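/- GENERATED by c/gen_decode.py: decode facts of the image, one per distinct instruction byte string. -/
import UserX.DecodeImage

#decode_all Vorbis.Dec
  "0f28da"  -- movaps xmm3,xmm2
  "0f8474070000"  -- je 11682e
  "0f8518010000"  -- jne 113b89
  "0f88d0feffff"  -- js 110c9f
  "0f8fb2060000"  -- jg 11665c
  "0fb6d3"  -- movzx edx,bl
  "39c8"  -- cmp eax,ecx
  "410fb644240d"  -- movzx eax,BYTE PTR [r12+0xd]
  "415f"  -- pop r15
  "41892c24"  -- mov DWORD PTR [r12],ebp
  "418b7e04"  -- mov edi,DWORD PTR [r14+0x4]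
  "41c7860000c000f1f1f1f1"  -- mov DWORD PTR [r14+0xc00000],0xf1f1f1f1
  "440faff3"  -- imul r14d,ebx
  "4439f0"  -- cmp eax,r14d
  "4489742438"  -- mov DWORD PTR [rsp+0x38],r14d
  "4489fe"  -- mov esi,r15d
  "448bb338060000"  -- mov r14d,DWORD PTR [rbx+0x638]
  "4539fd"  -- cmp r13d,r15d
  "458b6c24e8"  -- mov r13d,DWORD PTR [r12-0x18]
  "48035d20"  -- add rbx,QWORD PTR [rbp+0x20]
  "4863959c000000"  -- movsxd rdx,DWORD PTR [rbp+0x9c]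
  "4883bd3008000000"  -- cmp QWORD PTR [rbp+0x830],0x0
  "4889442470"  -- mov QWORD PTR [rsp+0x70],rax
  "4889f3"  -- mov rbx,rsi
  "488b75c8"  -- mov rsi,QWORD PTR [rbp-0x38]
  "488d3c6b"  -- lea rdi,[rbx+rbp*2]
  "488d7b78"  -- lea rdi,[rbx+0x78]
  "488d98b6000000"  -- lea rbx,[rax+0xb6]
  "488dbc4352010000"  -- lea rdi,[rbx+rax*2+0x152]
  "48c1e303"  -- shl rbx,0x3
  "4901f5"  -- add r13,rsi
  "49837c241000"  -- cmp QWORD PTR [r12+0x10],0x0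
  "498b742418"  -- mov rsi,QWORD PTR [r12+0x18]
  "498d7e18"  -- lea rdi,[r14+0x18]
  "49c1ed03"  -- shr r13,0x3
  "4a8dbcf4a0000000"  -- lea rdi,[rsp+r14*8+0xa0]
  "4c63e5"  -- movsxd r12,ebp
  "4c89f8"  -- mov rax,r15
  "4c8d24ab"  -- lea r12,[rbx+rbp*4]
  "4d39fc"  -- cmp r12,r15
  "4d8dac249e000000"  -- lea r13,[r12+0x9e]
  "660f2fd1"  -- comisd xmm2,xmm1
  "66410f7edf"  -- movd r15d,xmm3
  "720f"  -- jb 104771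
  "743f"  -- je 10cfb9
  "7536"  -- jne 113b15
  "7999"  -- jns 101321
  "7e54"  -- jle 1022a4
  "80bc24a200000073"  -- cmp BYTE PTR [rsp+0xa2],0x73
  "83c108"  -- add ecx,0x8
  "89442414"  -- mov DWORD PTR [rsp+0x14],eax
  "898568ffffff"  -- mov DWORD PTR [rbp-0x98],eax
  "8b4304"  -- mov eax,DWORD PTR [rbx+0x4]
  "8b74240c"  -- mov esi,DWORD PTR [rsp+0xc]
  "8d14ad00000000"  -- lea edx,[rbp*4+0x0]
  "bd00000000"  -- mov ebp,0x0
  "c6431001"  -- mov BYTE PTR [rbx+0x10],0x1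
  "c7838800000000000000"  -- mov DWORD PTR [rbx+0x88],0x0
  "e80320ffff"  -- call 100640
  "e80ceefeff"  -- call 103d00
  "e81768ffff"  -- call 100720
  "e8200dffff"  -- call 100300
  "e82a28ffff"  -- call 108f20
  "e832d7feff"  -- call 100720
  "e83df0ffff"  -- call 10d440
  "e84890ffff"  -- call 10d100
  "e8532affff"  -- call 100640
  "e85f65ffff"  -- call 1018c0
  "e86c13ffff"  -- call 100800
  "e87731ffff"  -- call 100800
  "e8820dffff"  -- call 103d00
  "e88daafeff"  -- call 100800
  "e896d3feff"  -- call 100720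
  "e8a0effeff"  -- call 100800
  "e8abc7feff"  -- call 100800
  "e8b4a3feff"  -- call 100640
  "e8bf10ffff"  -- call 100640
  "e8c971ffff"  -- call 100720
  "e8d36efeff"  -- call 100720
  "e8de01ffff"  -- call 103d00
  "e8e788ffff"  -- call 101780
  "e8eec8feff"  -- call 100800
  "e8f9fbfeff"  -- call 100800
  "e920010000"  -- jmp 11168d
  "e968f1ffff"  -- jmp 113b22
  "e9bed2ffff"  -- jmp 113b22
  "eb0f"  -- jmp 100c15
  "eba5"  -- jmp 111883
  "f20f10055bdb0100"  -- movsd xmm0,QWORD PTR [rip+0x1db5b]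
  "f20f5905b7d70100"  -- mulsd xmm0,QWORD PTR [rip+0x1d7b7]
  "f20f5ec0"  -- divsd xmm0,xmm0
  "f30f105c2418"  -- movss xmm3,DWORD PTR [rsp+0x18]
  "f30f110c24"  -- movss DWORD PTR [rsp],xmm1
  "f30f115c2410"  -- movss DWORD PTR [rsp+0x10],xmm3
  "f30f2adb"  -- cvtsi2ss xmm3,ebx
  "f30f594504"  -- mulss xmm0,DWORD PTR [rbp+0x4]
  "f30f5cc2"  -- subss xmm0,xmm2
  "f3410f107c240c"  -- movss xmm7,DWORD PTR [r12+0xc]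
  "f7f9"  -- idiv ecx
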